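-- pv_equiv track=rewrite | github.com/ace12358/WordSegmentation | src/pre_treatment.py | label_chars
-- ===== SOURCE A (Python) =====
-- def label_chars(sent):
--     chars_labels = []
--     label = "B"
--     for char in sent:
--         if char == " ":
--             label = "B"
--         else:
--             chars_labels.append((char,label))
--             label = "I"
--     return chars_labels
-- ===== SOURCE B (Python) =====
-- def label_chars(sent):
--     out = []
--     for word in sent.split(" "):
--         for i, ch in enumerate(word):
--             out.append((ch, "B" if i == 0 else "I"))
--     return out
-- ===== Notes on version B (the rewrite author's own statement) =====
-- stated objective: alternative
-- what changed: Replaces the running-label state machine over characters with a tokenize-then-label decomposition: split on a literal space and label each token's first character B and the rest I.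
import Mathlib
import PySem

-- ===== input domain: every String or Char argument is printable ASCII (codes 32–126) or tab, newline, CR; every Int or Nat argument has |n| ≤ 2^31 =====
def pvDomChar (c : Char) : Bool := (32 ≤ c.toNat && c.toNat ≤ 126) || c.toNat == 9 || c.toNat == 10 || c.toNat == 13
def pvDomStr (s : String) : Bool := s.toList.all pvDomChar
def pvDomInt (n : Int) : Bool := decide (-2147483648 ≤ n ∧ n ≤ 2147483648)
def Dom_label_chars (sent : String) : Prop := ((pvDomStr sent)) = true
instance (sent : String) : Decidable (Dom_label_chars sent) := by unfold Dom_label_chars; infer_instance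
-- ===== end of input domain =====

-- B replaces A's running-label character scan by split-on-space tokenization with positional labelling (alternative decomposition, same cost).

-- ===== PORT A =====
-- literal port of A: one pass over the characters with list accumulator and current label
def label_chars (sent : String) : List (String × String) :=
  (sent.toList.foldl
    (fun (st : List (String × String) × String) char =>
      if char = ' ' then (st.1, "B")
      else (st.1 ++ [(String.ofList [char], st.2)], "I"))
    ([], "B")).1

-- ===== PORT B =====
-- Source B's inner loop: first character of a token gets "B", the rest "I"
def labelWord (w : List Char) : List (String × String) :=
  match w with
  | [] => []
  | c :: rest => (String.ofList [c], "B") :: rest.map (fun d => (String.ofList [d], "I"))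

-- Source B: sent.split(" ") (nonempty separator form), then label each token by position
def label_chars_alt (sent : String) : List (String × String) :=
  (PySem.Chars.splitOn sent.toList [' ']).flatMap labelWord

-- ===== PRECONDITION & SPEC =====
def Spec_label_chars (sent : String) (out : List (String × String)) : Prop := out = label_chars_alt sent
instance (sent : String) (out : List (String × String)) : Decidable (Spec_label_chars sent out) := by unfold Spec_label_chars; infer_instance

-- ===== CLAIM (what is proved, stated in full; the proofs are below) =====
def Claim_equal_label_chars : Prop := ∀ (sent : String), Dom_label_chars sent → Spec_label_chars sent (label_chars sent)

-- ===== LEMMAS AND PROOFS =====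

-- structural characterisation of splitOn with single-space separator
def pvSp : List Char → List (List Char)
  | [] => [[]]
  | c :: cs =>
    if c = ' ' then [] :: pvSp cs
    else
      match pvSp cs with
      | [] => [[c]]
      | w :: r => (c :: w) :: r

def pvPrepend (p : List Char) : List (List Char) → List (List Char)
  | [] => [p]
  | w :: r => (p ++ w) :: r

lemma pvSp_ne_nil (cs : List Char) : pvSp cs ≠ [] := by
  cases cs with
  | nil => simp [pvSp]
  | cons c cs =>
    simp only [pvSp]
    split_ifs
    · simp
    · cases h : pvSp cs <;> simp

lemma pvGo_eq : ∀ (fuel : Nat) (l cur : List Char) (acc : List (List Char)),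
    l.length < fuel →
    PySem.Chars.splitOn.go [' '] fuel l cur acc = acc.reverse ++ pvPrepend cur.reverse (pvSp l) := by
  intro fuel
  induction fuel with
  | zero => intro l cur acc h; omega
  | succ f ih =>
    intro l cur acc h
    cases l with
    | nil =>
      simp [PySem.Chars.splitOn.go, pvSp, pvPrepend]
    | cons c rest =>
      by_cases hc : c = ' '
      · subst hc
        have hpref : List.isPrefixOf [' '] (' ' :: rest) = true := by
          simp [List.isPrefixOf]
        rw [PySem.Chars.splitOn.go]
        simp only [hpref, if_true]
        have : rest.length < f := by simpa using h
        rw [ih _ _ _ (by simpa using this)]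
        obtain ⟨w, r, hw⟩ : ∃ w r, pvSp rest = w :: r := by
          cases hsp : pvSp rest with
          | nil => exact absurd hsp (pvSp_ne_nil rest)
          | cons w r => exact ⟨w, r, rfl⟩
        simp [pvSp, hw, pvPrepend]
      · have hpref : List.isPrefixOf [' '] (c :: rest) = false := by
          simp [List.isPrefixOf]
          intro h'; exact absurd h'.symm hc
        rw [PySem.Chars.splitOn.go]
        rw [if_neg (by simp [hpref])]
        have : rest.length < f := by simpa using Nat.lt_of_succ_lt_succ h
        rw [ih _ _ _ this]
        obtain ⟨w, r, hw⟩ : ∃ w r, pvSp rest = w :: r := by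
          cases hsp : pvSp rest with
          | nil => exact absurd hsp (pvSp_ne_nil rest)
          | cons w r => exact ⟨w, r, rfl⟩
        simp [pvSp, hw, pvPrepend, hc]
lemma pvSplitOn_space (l : List Char) : PySem.Chars.splitOn l [' '] = pvSp l := by
  unfold PySem.Chars.splitOn
  rw [pvGo_eq (l.length + 1) l [] [] (by omega)]
  obtain ⟨w, r, hw⟩ : ∃ w r, pvSp l = w :: r := by
    cases hsp : pvSp l with
    | nil => exact absurd hsp (pvSp_ne_nil l)
    | cons w r => exact ⟨w, r, rfl⟩
  simp [hw, pvPrepend]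

-- clean recursive specification of A's scan, with the pending label as parameter
def pvSpec : List Char → String → List (String × String)
  | [], _ => []
  | c :: cs, lab =>
    if c = ' ' then pvSpec cs "B"
    else (String.ofList [c], lab) :: pvSpec cs "I"

lemma pvFold_eq : ∀ (cs : List Char) (acc : List (String × String)) (lab : String),
    (cs.foldl
      (fun (st : List (String × String) × String) char =>
        if char = ' ' then (st.1, "B")
        else (st.1 ++ [(String.ofList [char], st.2)], "I"))
      (acc, lab)).1 = acc ++ pvSpec cs lab := by
  intro cs
  induction cs with
  | nil => intro acc lab; simp [pvSpec]
  | cons c cs ih =>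
    intro acc lab
    by_cases hc : c = ' ' <;> simp [pvSpec, hc, ih]

def pvLabelI (w : List Char) : List (String × String) := w.map (fun d => (String.ofList [d], "I"))

lemma pvSp_spec : ∀ (cs : List Char) (w : List Char) (r : List (List Char)),
    pvSp cs = w :: r →
    (labelWord w ++ r.flatMap labelWord = pvSpec cs "B") ∧
    (pvLabelI w ++ r.flatMap labelWord = pvSpec cs "I") := by
  intro cs
  induction cs with
  | nil =>
    intro w r hw
    simp [pvSp] at hw
    obtain ⟨hw1, hw2⟩ := hw
    subst hw1; subst hw2
    simp [labelWord, pvLabelI, pvSpec]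
  | cons c cs ih =>
    intro w r hw
    obtain ⟨w', r', hw'⟩ : ∃ w' r', pvSp cs = w' :: r' := by
      cases hsp : pvSp cs with
      | nil => exact absurd hsp (pvSp_ne_nil cs)
      | cons a b => exact ⟨a, b, rfl⟩
    obtain ⟨ihB, ihI⟩ := ih w' r' hw'
    by_cases hc : c = ' '
    · subst hc
      rw [show pvSp (' ' :: cs) = [] :: pvSp cs from by simp [pvSp]] at hw
      injection hw with hw1 hw2
      subst hw1; subst hw2
      constructor
      · simp [labelWord, pvSpec, hw', List.flatMap_cons, ← ihB]
      · simp [pvLabelI, pvSpec, hw', List.flatMap_cons, ← ihB]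
    · rw [show pvSp (c :: cs) = (c :: w') :: r' from by simp [pvSp, hc, hw']] at hw
      injection hw with hw1 hw2
      subst hw1; subst hw2
      constructor
      · simp [labelWord, pvSpec, hc, ← ihI, pvLabelI]
      · simp [pvLabelI, pvSpec, hc, ← ihI]

-- ===== VERDICT (by name: the statement is the Claim_ definition above) =====
theorem label_chars_spec : Claim_equal_label_chars := by
  intro sent _
  unfold Spec_label_chars label_chars label_chars_alt
  rw [pvFold_eq, pvSplitOn_space]
  obtain ⟨w, r, hw⟩ : ∃ w r, pvSp sent.toList = w :: r := by
    cases hsp : pvSp sent.toList with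
    | nil => exact absurd hsp (pvSp_ne_nil sent.toList)
    | cons a b => exact ⟨a, b, rfl⟩
  rw [hw]
  obtain ⟨hB, _⟩ := pvSp_spec sent.toList w r hw
  simp [List.flatMap_cons, hB]
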